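-- pv_equiv track=rewrite | github.com/MrBrantCode/unitest_baseline | mut_generate/mist_train_cf/cf_23891/solution.py | schedule_workload
-- ===== SOURCE A (Python) =====
-- def schedule_workload(workload, min_work, max_work, min_rest, max_rest):
--     """
--     Assigns workloads over manageable working windows with rest periods in between.
--
--     Args:
--         workload (int): The total workload to be allocated.
--         min_work (int): The minimum limit for each allocated workload.
--         max_work (int): The maximum limit for each allocated workload.
--         min_rest (int): The minimum limit for the duration of the rest periods.
--         max_rest (int): The maximum limit for the duration of the rest periods.
--
--     Returns:
--         list[tuple[int, int]]: A list of tuples, where each tuple contains the allocated workload and the duration of the rest period that follows.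
--     """
--
--     allocated_workloads = []
--     while workload > 0:
--         # Calculate the workload for the current window
--         current_work = min(max_work, workload)
--         current_work = max(min_work, current_work)
--
--         # Calculate the rest period after the current workload
--         rest_period = min(max_rest, max_rest - min_rest) + min_rest
--
--         # Add the allocated workload and rest period to the result
--         allocated_workloads.append((current_work, rest_period))
--
--         # Update the remaining workload
--         workload -= current_work
--
--     return allocated_workloads
-- ===== SOURCE B (Python) =====
-- def schedule_workload(workload, min_work, max_work, min_rest, max_rest):
--     # Closed form: the loop's step is constant (max(min_work, max_work)) until the
--     # remainder is smaller than the step, so full chunks come from one division.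
--     if workload <= 0:
--         return []
--     step = max(min_work, max_work)
--     if step <= 0:
--         raise ValueError("work step must be positive")
--     rest = min(max_rest, max_rest - min_rest) + min_rest
--     q, r = divmod(workload, step)
--     chunks = [(step, rest)] * q
--     if r > 0:
--         chunks.append((max(min_work, min(max_work, r)), rest))
--     return chunks
-- ===== Notes on version B (the rewrite author's own statement) =====
-- stated objective: alternative
-- what changed: Replaces the subtract-one-chunk-at-a-time while loop by a closed form: one integer division gives the number of constant full chunks, built with list multiplication, plus at most one clamped final chunk.
import Mathlib
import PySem

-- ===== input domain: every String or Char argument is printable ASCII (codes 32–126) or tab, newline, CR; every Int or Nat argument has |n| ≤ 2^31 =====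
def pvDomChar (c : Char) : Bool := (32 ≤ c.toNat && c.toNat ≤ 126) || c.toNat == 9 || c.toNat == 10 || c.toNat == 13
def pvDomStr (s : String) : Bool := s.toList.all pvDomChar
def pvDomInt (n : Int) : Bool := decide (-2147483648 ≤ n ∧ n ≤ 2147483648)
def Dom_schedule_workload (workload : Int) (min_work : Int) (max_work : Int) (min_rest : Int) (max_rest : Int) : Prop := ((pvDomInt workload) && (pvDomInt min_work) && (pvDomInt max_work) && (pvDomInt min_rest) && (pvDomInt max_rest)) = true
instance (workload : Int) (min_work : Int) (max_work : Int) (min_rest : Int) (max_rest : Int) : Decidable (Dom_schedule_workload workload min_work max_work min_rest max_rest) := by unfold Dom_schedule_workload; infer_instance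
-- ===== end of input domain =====

-- B replaces A's chunk-by-chunk while loop by a closed form (one division + list replication); equal wherever A terminates.


-- ===== PORT A =====
-- A's while loop, with fuel = workload.toNat: when the step is positive each
-- iteration subtracts at least 1, so the fuel suffices on all inputs Pre_ admits.
def scheduleLoopA (fuel : Nat) (workload : Int) (min_work : Int) (max_work : Int)
    (min_rest : Int) (max_rest : Int) : List (Int × Int) :=
  match fuel with
  | 0 => []
  | f + 1 =>
    if workload > 0 then
      let current_work := max min_work (min max_work workload)
      let rest_period := min max_rest (max_rest - min_rest) + min_rest
      (current_work, rest_period) :: scheduleLoopA f (workload - current_work) min_work max_work min_rest max_rest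
    else []

def schedule_workload (workload : Int) (min_work : Int) (max_work : Int) (min_rest : Int) (max_rest : Int) : List (Int × Int) :=
  scheduleLoopA workload.toNat workload min_work max_work min_rest max_rest

-- ===== PORT B =====
def schedule_workload_alt (workload : Int) (min_work : Int) (max_work : Int) (min_rest : Int) (max_rest : Int) : List (Int × Int) :=
  if workload ≤ 0 then []
  else
    let step := max min_work max_work
    if step ≤ 0 then []  -- Source B raises ValueError here; outside Pre_ (A diverges there too)
    else
      let rest := min max_rest (max_rest - min_rest) + min_rest
      let q := PySem.Int.floordiv workload step
      let r := PySem.Int.mod workload step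
      let chunks := List.replicate q.toNat (step, rest)  -- q ≥ 0 here, so toNat is exact
      if r > 0 then chunks ++ [(max min_work (min max_work r), rest)] else chunks

-- ===== PRECONDITION & SPEC =====
-- Pre_ excludes workload > 0 with both min_work ≤ 0 and max_work ≤ 0: there the step is
-- non-positive, A's while loop never terminates (returns nothing), and B raises ValueError.
def Pre_schedule_workload (workload : Int) (min_work : Int) (max_work : Int) (min_rest : Int) (max_rest : Int) : Prop :=
  workload ≤ 0 ∨ 0 < max min_work max_work
instance (workload : Int) (min_work : Int) (max_work : Int) (min_rest : Int) (max_rest : Int) : Decidable (Pre_schedule_workload workload min_work max_work min_rest max_rest) := by unfold Pre_schedule_workload; infer_instance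

def pvWitness_schedule_workload : Int × Int × Int × Int × Int := (10, 2, 3, 1, 2)

def Spec_schedule_workload (workload : Int) (min_work : Int) (max_work : Int) (min_rest : Int) (max_rest : Int) (out : List (Int × Int)) : Prop := out = schedule_workload_alt workload min_work max_work min_rest max_rest
instance (workload : Int) (min_work : Int) (max_work : Int) (min_rest : Int) (max_rest : Int) (out : List (Int × Int)) : Decidable (Spec_schedule_workload workload min_work max_work min_rest max_rest out) := by unfold Spec_schedule_workload; infer_instance

-- ===== CLAIM (what is proved, stated in full; the proofs are below) =====
def Claim_equal_schedule_workload : Prop := ∀ (workload : Int) (min_work : Int) (max_work : Int) (min_rest : Int) (max_rest : Int), Dom_schedule_workload workload min_work max_work min_rest max_rest → Pre_schedule_workload workload min_work max_work min_rest max_rest → Spec_schedule_workload workload min_work max_work min_rest max_rest (schedule_workload workload min_work max_work min_rest max_rest)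

-- ===== LEMMAS AND PROOFS =====

theorem scheduleLoopA_nonpos (fuel : Nat) (w mw Mw mr Mr : Int) (h : w ≤ 0) :
    scheduleLoopA fuel w mw Mw mr Mr = [] := by
  cases fuel with
  | zero => rfl
  | succ f => simp [scheduleLoopA]; omega

-- The closed form B computes for positive workload (with step > 0).
def closedForm (w mw Mw mr Mr : Int) : List (Int × Int) :=
  let step := max mw Mw
  let rest := min Mr (Mr - mr) + mr
  let q := PySem.Int.floordiv w step
  let r := PySem.Int.mod w step
  if r > 0 then List.replicate q.toNat (step, rest) ++ [(max mw (min Mw r), rest)]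
  else List.replicate q.toNat (step, rest)

theorem loop_eq_closed (mw Mw mr Mr : Int) (hs : 0 < max mw Mw) :
    ∀ (fuel : Nat) (w : Int), 0 < w → w.toNat ≤ fuel →
      scheduleLoopA fuel w mw Mw mr Mr = closedForm w mw Mw mr Mr := by
  intro fuel
  induction fuel with
  | zero => intro w hw hf; omega
  | succ f ih =>
    intro w hw hf
    have hdiv : PySem.Int.floordiv w (max mw Mw) = w / (max mw Mw) :=
      PySem.Int.floordiv_eq_ediv_of_pos hs
    have hmod : PySem.Int.mod w (max mw Mw) = w % (max mw Mw) :=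
      PySem.Int.mod_eq_emod_of_pos hs
    simp only [scheduleLoopA, if_pos hw]
    by_cases hws : max mw Mw ≤ w
    · -- full chunk: current_work = max mw Mw
      have hcw : max mw (min Mw w) = max mw Mw := by omega
      rw [hcw]
      have hq1 : w / (max mw Mw) = (w - max mw Mw) / (max mw Mw) + 1 := by
        have := Int.add_mul_ediv_right (w - max mw Mw) 1 (by omega : (max mw Mw) ≠ 0)
        simpa using this
      have hr1 : (w - max mw Mw) % (max mw Mw) = w % (max mw Mw) :=
        Int.sub_emod_right w (max mw Mw)
      by_cases hpos : 0 < w - max mw Mw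
      · rw [ih (w - max mw Mw) hpos (by omega)]
        have hdiv' : PySem.Int.floordiv (w - max mw Mw) (max mw Mw) = (w - max mw Mw) / (max mw Mw) :=
          PySem.Int.floordiv_eq_ediv_of_pos hs
        have hmod' : PySem.Int.mod (w - max mw Mw) (max mw Mw) = (w - max mw Mw) % (max mw Mw) :=
          PySem.Int.mod_eq_emod_of_pos hs
        have hq0 : 0 ≤ (w - max mw Mw) / (max mw Mw) := Int.ediv_nonneg (by omega) (by omega)
        have htn : (w / (max mw Mw)).toNat = ((w - max mw Mw) / (max mw Mw)).toNat + 1 := by omega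
        simp only [closedForm, hdiv, hmod, hdiv', hmod', hr1, htn, List.replicate_succ]
        split <;> simp
      · -- w = max mw Mw exactly: one chunk, remainder 0
        have hweq : w = max mw Mw := by omega
        rw [scheduleLoopA_nonpos f _ mw Mw mr Mr (by omega)]
        have hr0 : w % (max mw Mw) = 0 := by rw [hweq]; simp
        have hq : w / (max mw Mw) = 1 := by rw [hweq]; exact Int.ediv_self (by omega)
        simp [closedForm, hdiv, hmod, hr0, hq]
    · -- final partial chunk: 0 < w < max mw Mw, current_work ≥ w
      rw [scheduleLoopA_nonpos f _ mw Mw mr Mr (by omega)]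
      have hq : w / (max mw Mw) = 0 := Int.ediv_eq_zero_of_lt (by omega) (by omega)
      have hr : w % (max mw Mw) = w := Int.emod_eq_of_lt (by omega) (by omega)
      simp [closedForm, hdiv, hmod, hq, hr, hw]

theorem alt_eq_closed (w mw Mw mr Mr : Int) (hw : 0 < w) (hs : 0 < max mw Mw) :
    schedule_workload_alt w mw Mw mr Mr = closedForm w mw Mw mr Mr := by
  simp only [schedule_workload_alt, closedForm]
  rw [if_neg (by omega), if_neg (by omega)]

-- ===== VERDICT (by name: the statement is the Claim_ definition above) =====
theorem schedule_workload_spec : Claim_equal_schedule_workload := by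
  intro w mw Mw mr Mr _hdom hpre
  unfold Spec_schedule_workload schedule_workload
  by_cases hw : 0 < w
  · have hs : 0 < max mw Mw := by
      rcases hpre with h | h
      · omega
      · exact h
    rw [loop_eq_closed mw Mw mr Mr hs w.toNat w hw le_rfl, alt_eq_closed w mw Mw mr Mr hw hs]
  · rw [scheduleLoopA_nonpos _ _ _ _ _ _ (by omega)]
    simp [schedule_workload_alt]
    omega
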